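-- pv_equiv track=rewrite | github.com/nhsengland/evalsense | scripts/update_changelog.py | extract_non_empty_sections
-- ===== SOURCE A (Python) =====
-- SECTION_HEADERS = [
--     "### Breaking changes",
--     "### Enhancements",
--     "### Bug fixes",
--     "### Documentation",
--     "### Miscellaneous",
-- ]
--
-- def extract_non_empty_sections(unreleased_lines: list[str]) -> list[str]:
--     """Extracts non-empty sections from the unreleased lines.
--
--     Args:
--         unreleased_lines (list[str]): The lines of the unreleased section.
--
--     Returns:
--         list[str]: A list of non-empty sections.
--     """
--     current_section = None
--     buffer = []
--     result = []
--
--     for line in unreleased_lines[1:]:  # Skip "## Unreleased"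
--         if any(line.startswith(h) for h in SECTION_HEADERS):
--             if current_section and buffer:
--                 result.extend([current_section] + buffer + [""])
--             current_section = line
--             buffer = []
--         elif line.strip() == "- None":
--             continue
--         elif line.strip().startswith("- "):
--             buffer.append(line)
--
--     if current_section and buffer:
--         result.extend([current_section] + buffer + [""])
--
--     return result
-- ===== SOURCE B (Python) =====
-- SECTION_HEADERS = [
--     "### Breaking changes",
--     "### Enhancements",
--     "### Bug fixes",
--     "### Documentation",
--     "### Miscellaneous",
-- ]
--
--
-- def _is_header(line):
--     return any(line.startswith(h) for h in SECTION_HEADERS)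
--
--
-- def _is_bullet(line):
--     stripped = line.strip()
--     return stripped.startswith("- ") and stripped != "- None"
--
--
-- def extract_non_empty_sections(unreleased_lines: list[str]) -> list[str]:
--     """Segment-then-filter reformulation: split the lines (after the
--     "## Unreleased" line) at section headers, dropping anything before the
--     first header, then keep each header with its filtered bullet lines."""
--     lines = unreleased_lines[1:]
--     n = len(lines)
--     # index of the first header; content before it is discarded
--     start = 0
--     while start < n and not _is_header(lines[start]):
--         start += 1
--     result = []
--     while start < n:
--         header = lines[start]
--         stop = start + 1
--         while stop < n and not _is_header(lines[stop]):
--             stop += 1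
--         bullets = [ln for ln in lines[start + 1:stop] if _is_bullet(ln)]
--         if bullets:
--             result += [header] + bullets + [""]
--         start = stop
--     return result
-- ===== Notes on version B (the rewrite author's own statement) =====
-- stated objective: alternative
-- what changed: Replaces the current_section/buffer state machine with an explicit segment-then-filter structure: locate the header positions (discarding content before the first header), then for each header-delimited slice filter its bullet lines and emit the header, the kept bullets and an empty separator line when any bullet survives.
import Mathlib
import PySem

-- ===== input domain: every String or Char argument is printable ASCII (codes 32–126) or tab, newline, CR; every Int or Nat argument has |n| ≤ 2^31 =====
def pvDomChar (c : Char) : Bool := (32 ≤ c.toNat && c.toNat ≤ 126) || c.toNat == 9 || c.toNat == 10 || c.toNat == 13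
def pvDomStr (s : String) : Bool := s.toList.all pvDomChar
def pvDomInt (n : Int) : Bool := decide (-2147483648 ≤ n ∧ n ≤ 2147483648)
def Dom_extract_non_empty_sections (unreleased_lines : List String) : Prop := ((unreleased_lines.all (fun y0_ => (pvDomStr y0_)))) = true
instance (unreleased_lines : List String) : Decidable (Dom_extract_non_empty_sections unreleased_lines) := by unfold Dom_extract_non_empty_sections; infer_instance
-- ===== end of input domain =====

-- B replaces A's current_section/buffer state machine by a segment-then-filter
-- decomposition (split at headers, filter each slice's bullets); same cost, alternative structure.

-- ===== PORT A =====
def SECTION_HEADERS : List String :=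
  ["### Breaking changes", "### Enhancements", "### Bug fixes",
   "### Documentation", "### Miscellaneous"]

-- 'if current_section and buffer': a str is truthy iff non-empty
def csTruthy : Option String → Bool
  | some s => s ≠ ""
  | none => false

-- the loop of A, over state (current_section, buffer, result)
def loopA : Option String → List String → List String → List String → List String
  | cs, buf, res, [] =>
      if csTruthy cs && !buf.isEmpty then res ++ cs.toList ++ buf ++ [""] else res
  | cs, buf, res, line :: rest =>
      if SECTION_HEADERS.any (fun h => PySem.Str.startswith line h) then
        loopA (some line) []
          (if csTruthy cs && !buf.isEmpty then res ++ cs.toList ++ buf ++ [""] else res) rest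
      else if PySem.Str.strip line == "- None" then
        loopA cs buf res rest
      else if PySem.Str.startswith (PySem.Str.strip line) "- " then
        loopA cs (buf ++ [line]) res rest
      else
        loopA cs buf res rest

def extract_non_empty_sections (unreleased_lines : List String) : List String :=
  -- unreleased_lines[1:] = drop 1 (PySem.List.slice unreleased_lines (some 1) none = drop 1)
  loopA none [] [] (PySem.List.slice unreleased_lines (some 1) none)

-- ===== PORT B =====
def isHeaderB (line : String) : Bool :=
  SECTION_HEADERS.any (fun h => PySem.Str.startswith line h)

def isBulletB (line : String) : Bool :=
  PySem.Str.startswith (PySem.Str.strip line) "- " && PySem.Str.strip line != "- None"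

-- the segment loop of B, one call per header segment: Source B's inner index scan to the
-- next header (stop) and the slice lines[start+1:stop] / continuation lines[stop:] are
-- the takeWhile / dropWhile split of the suffix after the header
def segsB : List String → List String
  | [] => []
  | header :: rest =>
      let bullets := (rest.takeWhile (fun l => !isHeaderB l)).filter isBulletB
      (if bullets.isEmpty then [] else [header] ++ bullets ++ [""]) ++
        segsB (rest.dropWhile (fun l => !isHeaderB l))
termination_by ls => ls.length
decreasing_by
  simp only [List.length_cons]
  exact Nat.lt_succ_of_le (List.length_dropWhile_le _ _)

def extract_non_empty_sections_alt (unreleased_lines : List String) : List String :=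
  segsB ((PySem.List.slice unreleased_lines (some 1) none).dropWhile (fun l => !isHeaderB l))

-- ===== PRECONDITION & SPEC =====
def Spec_extract_non_empty_sections (unreleased_lines : List String) (out : List String) : Prop := out = extract_non_empty_sections_alt unreleased_lines
instance (unreleased_lines : List String) (out : List String) : Decidable (Spec_extract_non_empty_sections unreleased_lines out) := by unfold Spec_extract_non_empty_sections; infer_instance

-- ===== CLAIM (what is proved, stated in full; the proofs are below) =====
def Claim_equal_extract_non_empty_sections : Prop := ∀ (unreleased_lines : List String), Dom_extract_non_empty_sections unreleased_lines → Spec_extract_non_empty_sections unreleased_lines (extract_non_empty_sections unreleased_lines)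

-- ===== LEMMAS AND PROOFS =====

theorem segsB_nil : segsB [] = [] := by
  rw [segsB.eq_def]

theorem segsB_cons (h : String) (rest : List String) :
    segsB (h :: rest) =
      (let bullets := (rest.takeWhile (fun l => !isHeaderB l)).filter isBulletB
       if bullets.isEmpty then [] else [h] ++ bullets ++ [""]) ++
        segsB (rest.dropWhile (fun l => !isHeaderB l)) := by
  conv_lhs => rw [segsB.eq_def]

theorem header_ne_empty {h : String} (hh : isHeaderB h = true) : h ≠ "" := by
  intro he; subst he; exact absurd hh (by decide)

-- key invariant for the header state: loopA with current section h produces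
-- the segment for h (with the already-buffered bullets in front) and then segsB of the rest
theorem loopA_some (xs : List String) : ∀ (buf res : List String) (h : String),
    isHeaderB h = true →
    loopA (some h) buf res xs =
      res ++
        (let bullets := buf ++ (xs.takeWhile (fun l => !isHeaderB l)).filter isBulletB
         if bullets.isEmpty then [] else [h] ++ bullets ++ [""]) ++
        segsB (xs.dropWhile (fun l => !isHeaderB l)) := by
  induction xs with
  | nil =>
      intro buf res h hh
      simp [loopA, csTruthy, header_ne_empty hh, segsB_nil]
      by_cases hb : buf = [] <;> simp [hb]
  | cons x rest ih =>
      intro buf res h hh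
      by_cases hx : isHeaderB x = true
      · have hx' : (SECTION_HEADERS.any fun h => PySem.Str.startswith x h) = true := by
          simpa [isHeaderB] using hx
        simp only [loopA, hx', if_true]
        rw [ih [] _ x hx]
        simp only [List.takeWhile_cons, List.dropWhile_cons, hx, Bool.not_true,
          Bool.false_eq_true, if_false]
        rw [segsB_cons]
        simp only [csTruthy, ne_eq, header_ne_empty hh, not_false_eq_true, decide_true,
          Bool.true_and]
        by_cases hb : buf = [] <;> simp [hb]
      · have hx' : (SECTION_HEADERS.any fun h => PySem.Str.startswith x h) = false := by
          simpa [isHeaderB] using hx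
        simp only [loopA, hx', if_false, Bool.false_eq_true]
        simp only [List.takeWhile_cons, List.dropWhile_cons, hx, Bool.not_false, if_true]
        by_cases hn : PySem.Str.strip x == "- None"
        · rw [if_pos hn, ih buf res h hh]
          have hbx : isBulletB x = false := by
            simp [isBulletB, eq_of_beq hn]
          simp [hbx]
        · rw [if_neg hn]
          by_cases hd : PySem.Str.startswith (PySem.Str.strip x) "- " = true
          · rw [if_pos hd, ih (buf ++ [x]) res h hh]
            have hbx : isBulletB x = true := by
              simp only [isBulletB, hd, Bool.true_and]
              simpa using hn
            simp [hbx]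
          · rw [if_neg hd, ih buf res h hh]
            have hbx : isBulletB x = false := by
              simp only [isBulletB,
                show PySem.Str.startswith (PySem.Str.strip x) "- " = false from
                  Bool.eq_false_iff.mpr hd, Bool.false_and]
            simp [hbx]

-- before the first header nothing is ever emitted
theorem loopA_none (xs : List String) : ∀ (buf res : List String),
    loopA none buf res xs = res ++ segsB (xs.dropWhile (fun l => !isHeaderB l)) := by
  induction xs with
  | nil => intro buf res; simp [loopA, csTruthy, segsB_nil]
  | cons x rest ih =>
      intro buf res
      by_cases hx : isHeaderB x = true
      · have hx' : (SECTION_HEADERS.any fun h => PySem.Str.startswith x h) = true := by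
          simpa [isHeaderB] using hx
        simp only [loopA, hx', if_true, csTruthy, Bool.false_and, Bool.false_eq_true, if_false]
        simp only [List.dropWhile_cons, hx, Bool.not_true, Bool.false_eq_true, if_false]
        rw [loopA_some rest [] res x hx, segsB_cons]
        simp
      · have hx' : (SECTION_HEADERS.any fun h => PySem.Str.startswith x h) = false := by
          simpa [isHeaderB] using hx
        simp only [loopA, hx', Bool.false_eq_true, if_false]
        simp only [List.dropWhile_cons, hx, Bool.not_false, if_true]
        split_ifs <;> exact ih _ _

-- ===== VERDICT (by name: the statement is the Claim_ definition above) =====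
theorem extract_non_empty_sections_spec : Claim_equal_extract_non_empty_sections := by
  intro unreleased_lines _
  show _ = _
  unfold extract_non_empty_sections extract_non_empty_sections_alt
  rw [loopA_none]
  simp
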